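-- pv_equiv track=rewrite | github.com/pxxptm/Data-Structure-KMITL | 6_2.py | specialCharAdd_Odd
-- ===== SOURCE A (Python) =====
-- def length(txt) :
--     if txt is "" :
--         return 0
--     else :
--         return 1 + length(txt[1:])
--
-- def specialCharAdd_Odd(txt) :
--     if not txt :
--         return ""
--     else :
--         if length(txt) % 2 == 1 :
--                 return txt[0] + "*" + specialCharAdd_Odd(txt[1:])
--         else :
--             return txt[0] + "~" + specialCharAdd_Odd(txt[1:])
-- ===== SOURCE B (Python) =====
-- def specialCharAdd_Odd(txt):
--     out = []
--     star = True
--     for ch in reversed(txt):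
--         out.append(ch + ("*" if star else "~"))
--         star = not star
--     return "".join(reversed(out))
-- ===== Notes on version B (the rewrite author's own statement) =====
-- stated objective: faster
-- what changed: Single right-to-left pass with a boolean toggle for the marker instead of recomputing the remaining length recursively at every position; result assembled from a list instead of recursive string concatenation.
import Mathlib
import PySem

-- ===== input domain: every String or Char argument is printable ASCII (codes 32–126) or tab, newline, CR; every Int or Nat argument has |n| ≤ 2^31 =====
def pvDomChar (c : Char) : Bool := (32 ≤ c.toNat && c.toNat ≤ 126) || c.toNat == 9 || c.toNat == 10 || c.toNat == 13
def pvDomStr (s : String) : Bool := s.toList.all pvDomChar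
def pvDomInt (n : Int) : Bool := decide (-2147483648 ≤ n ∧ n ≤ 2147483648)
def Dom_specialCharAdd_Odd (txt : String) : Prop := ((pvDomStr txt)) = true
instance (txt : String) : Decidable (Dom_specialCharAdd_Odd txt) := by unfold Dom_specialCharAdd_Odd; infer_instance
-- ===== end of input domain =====

-- B replaces A's quadratic rescan (remaining length recursion per position) with one
-- right-to-left pass keeping a boolean toggle; return value only, both are pure.

-- ===== PORT A =====
-- helper 'length': recursive length of the string (over its character list)
def pvLengthA : List Char → Int
  | [] => 0
  | _ :: t => 1 + pvLengthA t

-- recursive body of A over the character list (txt[1:] = tail)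
def pvGoA : List Char → List Char
  | [] => []
  | c :: t =>
    if PySem.Int.mod (pvLengthA (c :: t)) 2 == 1 then
      c :: '*' :: pvGoA t
    else
      c :: '~' :: pvGoA t

def specialCharAdd_Odd (txt : String) : String := String.mk (pvGoA txt.toList)

-- ===== PORT B =====
-- the loop of B: foldl over reversed(txt), state = (out, star)
def pvStepB (st : List (List Char) × Bool) (c : Char) : List (List Char) × Bool :=
  (st.1 ++ [[c, if st.2 then '*' else '~']], !st.2)

def specialCharAdd_Odd_alt (txt : String) : String :=
  String.mk ((txt.toList.reverse.foldl pvStepB ([], true)).1.reverse.flatten)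

-- ===== PRECONDITION & SPEC =====
def Spec_specialCharAdd_Odd (txt : String) (out : String) : Prop := out = specialCharAdd_Odd_alt txt
instance (txt : String) (out : String) : Decidable (Spec_specialCharAdd_Odd txt out) := by unfold Spec_specialCharAdd_Odd; infer_instance

-- ===== CLAIM (what is proved, stated in full; the proofs are below) =====
def Claim_equal_specialCharAdd_Odd : Prop := ∀ (txt : String), Dom_specialCharAdd_Odd txt → Spec_specialCharAdd_Odd txt (specialCharAdd_Odd txt)

-- ===== LEMMAS AND PROOFS =====

-- marker character for a toggle state
def pvMk (b : Bool) : Char := if b then '*' else '~'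

-- reference: element followed by t gets marker xor (t.length odd) b (b = marker at the end)
def pvFg : List Char → Bool → List Char
  | [], _ => []
  | c :: t, b => c :: pvMk (xor (decide (t.length % 2 = 1)) b) :: pvFg t b

-- pure form of B's loop body
def pvPureB : List Char → Bool → List (List Char)
  | [], _ => []
  | c :: r, b => [c, pvMk b] :: pvPureB r (!b)

theorem pvLengthA_eq (l : List Char) : pvLengthA l = (l.length : Int) := by
  induction l with
  | nil => simp [pvLengthA]
  | cons c t ih => simp [pvLengthA, ih]; omega

theorem pvGoA_eq_fg (l : List Char) : pvGoA l = pvFg l true := by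
  induction l with
  | nil => rfl
  | cons c t ih =>
    simp only [pvGoA, pvFg, ih, pvLengthA_eq, PySem.Int.mod]
    rcases Nat.even_or_odd t.length with h | h
    · have h0 : t.length % 2 = 0 := Nat.even_iff.mp h
      have h1 : ((t.length : Int) + 1).fmod 2 = 1 := by
        rw [Int.fmod_eq_emod]; simp; omega
      simp [h0, h1, pvMk]
    · have h0 : t.length % 2 = 1 := Nat.odd_iff.mp h
      have h1 : ((t.length : Int) + 1).fmod 2 = 0 := by
        rw [Int.fmod_eq_emod]; simp; omega
      simp [h0, h1, pvMk]

theorem pvFoldB_eq_pure (r : List Char) : ∀ (acc : List (List Char)) (b : Bool),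
    (r.foldl pvStepB (acc, b)).1 = acc ++ pvPureB r b := by
  induction r with
  | nil => intro acc b; simp [pvPureB]
  | cons c r ih =>
    intro acc b
    simp only [List.foldl, pvStepB, pvPureB, ih]
    cases b <;> simp [pvMk]

theorem pvFg_snoc (l : List Char) (c : Char) (b : Bool) :
    pvFg (l ++ [c]) b = pvFg l (!b) ++ [c, pvMk b] := by
  induction l generalizing b with
  | nil => simp [pvFg]
  | cons d t ih =>
    simp only [List.cons_append, pvFg, ih, List.length_append]
    have : decide ((t.length + 1) % 2 = 1) = !decide (t.length % 2 = 1) := by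
      rcases Nat.even_or_odd t.length with h | h
      · have := Nat.even_iff.mp h; simp [this]; omega
      · have := Nat.odd_iff.mp h; simp [this]; omega
    cases b <;> simp [this]

theorem pvPureB_rev (r : List Char) : ∀ (b : Bool),
    (pvPureB r b).reverse.flatten = pvFg r.reverse b := by
  induction r with
  | nil => intro b; rfl
  | cons c r ih =>
    intro b
    simp only [pvPureB, List.reverse_cons, List.flatten_append, ih, pvFg_snoc]
    simp

-- ===== VERDICT (by name: the statement is the Claim_ definition above) =====
theorem specialCharAdd_Odd_spec : Claim_equal_specialCharAdd_Odd := by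
  intro txt _
  show specialCharAdd_Odd txt = specialCharAdd_Odd_alt txt
  rw [specialCharAdd_Odd, specialCharAdd_Odd_alt, pvFoldB_eq_pure, pvGoA_eq_fg]
  simp [pvPureB_rev]
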